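-- pv_equiv track=rewrite | github.com/ozymaxx/multimodal_collection_analysis | speech_nl/report/confmatrix.py | oneVsAll
-- ===== SOURCE A (Python) =====
-- def rowSum(rowindex,confmatrix):
-- 	return sum(confmatrix[rowindex])
--
-- def colSum(colindex,confmatrix):
-- 	result = 0
--
-- 	for i in range(len(confmatrix[0])):
-- 		result = result + confmatrix[i][colindex]
--
-- 	return result
--
-- def sumAll(confmatrix):
-- 	result = 0
--
-- 	for i in range(len(confmatrix[0])):
-- 		result = result+sum(confmatrix[i])
--
-- 	return result
--
-- def oneVsAll(confmatrix):
-- 	onevsmatrix = [[0,0],[0,0]]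
--
-- 	for i in range(len(confmatrix[0])):
-- 		rs = rowSum(i,confmatrix)
-- 		cs = colSum(i,confmatrix)
-- 		onevsmatrix[0][0] = onevsmatrix[0][0]+confmatrix[i][i]
-- 		onevsmatrix[0][1] = onevsmatrix[0][1]+rs-confmatrix[i][i]
-- 		onevsmatrix[1][0] = onevsmatrix[1][0]+cs-confmatrix[i][i]
-- 		onevsmatrix[1][1] = onevsmatrix[1][1]+sumAll(confmatrix)-rs-cs+confmatrix[i][i]
--
-- 	return onevsmatrix
-- ===== SOURCE B (Python) =====
-- def oneVsAll(confmatrix):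
-- 	n = len(confmatrix[0])
-- 	rowsums = [sum(confmatrix[i]) for i in range(n)]
-- 	colsums = [sum(confmatrix[i][j] for i in range(n)) for j in range(n)]
-- 	diag = sum(confmatrix[i][i] for i in range(n))
-- 	total = sum(rowsums)
-- 	tp = diag
-- 	fn = total - diag
-- 	fp = sum(colsums) - diag
-- 	tn = n * total - total - sum(colsums) + diag
-- 	return [[tp, fn], [fp, tn]]
-- ===== Notes on version B (the rewrite author's own statement) =====
-- stated objective: faster
-- what changed: Replaces A's O(n^3) loop, which recomputes a column sum and the whole-matrix sum at every row, by a single precomputation of the row sums, column sums and diagonal, from which the 2x2 result is assembled in closed form.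
import Mathlib
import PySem

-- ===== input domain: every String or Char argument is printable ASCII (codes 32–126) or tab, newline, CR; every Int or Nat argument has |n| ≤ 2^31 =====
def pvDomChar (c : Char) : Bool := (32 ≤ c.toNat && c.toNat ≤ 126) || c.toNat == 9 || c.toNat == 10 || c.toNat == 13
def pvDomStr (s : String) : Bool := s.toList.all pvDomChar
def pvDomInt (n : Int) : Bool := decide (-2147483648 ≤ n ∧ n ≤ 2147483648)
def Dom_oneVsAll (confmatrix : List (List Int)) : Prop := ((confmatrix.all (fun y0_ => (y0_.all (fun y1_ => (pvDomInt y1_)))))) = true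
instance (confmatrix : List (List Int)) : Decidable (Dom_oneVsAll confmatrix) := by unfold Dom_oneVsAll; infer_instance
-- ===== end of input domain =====

-- B precomputes row sums, column sums and the diagonal once and assembles the 2x2 result in
-- closed form, instead of A's per-row re-summation of columns and of the whole matrix.
-- Indexing helpers shared by both ports: Python m[i] / row[j]; on Pre_ every index used is in
-- range, so the default never fires and pyGetD is exact there.
def pvRow (m : List (List Int)) (i : Int) : List Int := PySem.List.pyGetD m i []
def pvEnt (r : List Int) (j : Int) : Int := PySem.List.pyGetD r j 0

-- ===== PORT A =====
def rowSumA (rowindex : Int) (confmatrix : List (List Int)) : Int := (pvRow confmatrix rowindex).sum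

def colSumA (colindex : Int) (confmatrix : List (List Int)) : Int :=
  (PySem.List.pyRange 0 ((pvRow confmatrix 0).length : Int) 1).foldl
    (fun result i => result + pvEnt (pvRow confmatrix i) colindex) 0

def sumAllA (confmatrix : List (List Int)) : Int :=
  (PySem.List.pyRange 0 ((pvRow confmatrix 0).length : Int) 1).foldl
    (fun result i => result + (pvRow confmatrix i).sum) 0

def oneVsAll (confmatrix : List (List Int)) : List (List Int) :=
  let s :=
    (PySem.List.pyRange 0 ((pvRow confmatrix 0).length : Int) 1).foldl
      (fun (st : Int × Int × Int × Int) i =>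
        let rs := rowSumA i confmatrix
        let cs := colSumA i confmatrix
        (st.1 + pvEnt (pvRow confmatrix i) i,
         st.2.1 + rs - pvEnt (pvRow confmatrix i) i,
         st.2.2.1 + cs - pvEnt (pvRow confmatrix i) i,
         st.2.2.2 + sumAllA confmatrix - rs - cs + pvEnt (pvRow confmatrix i) i))
      (0, 0, 0, 0)
  [[s.1, s.2.1], [s.2.2.1, s.2.2.2]]

-- ===== PORT B =====
def oneVsAll_alt (confmatrix : List (List Int)) : List (List Int) :=
  let n : Int := ((pvRow confmatrix 0).length : Int)
  let rowsums := (PySem.List.pyRange 0 n 1).map (fun i => (pvRow confmatrix i).sum)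
  let colsums := (PySem.List.pyRange 0 n 1).map
    (fun j => ((PySem.List.pyRange 0 n 1).map (fun i => pvEnt (pvRow confmatrix i) j)).sum)
  let diag := ((PySem.List.pyRange 0 n 1).map (fun i => pvEnt (pvRow confmatrix i) i)).sum
  let total := rowsums.sum
  let tp := diag
  let fn := total - diag
  let fp := colsums.sum - diag
  let tn := n * total - total - colsums.sum + diag
  [[tp, fn], [fp, tn]]

-- ===== PRECONDITION & SPEC =====
-- Pre_: exactly the inputs where Python A returns normally: confmatrix[0] exists (IndexError on []),
-- with n = len(confmatrix[0]) the matrix has at least n rows and each of the first n rows has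
-- length ≥ n (otherwise colSum raises IndexError).
def Pre_oneVsAll (confmatrix : List (List Int)) : Prop :=
  confmatrix ≠ [] ∧
  confmatrix.headI.length ≤ confmatrix.length ∧
  ∀ r ∈ confmatrix.take confmatrix.headI.length, confmatrix.headI.length ≤ r.length

instance (confmatrix : List (List Int)) : Decidable (Pre_oneVsAll confmatrix) := by
  unfold Pre_oneVsAll; infer_instance

def pvWitness_oneVsAll : List (List Int) := [[1, 2], [3, 4]]

def Spec_oneVsAll (confmatrix : List (List Int)) (out : List (List Int)) : Prop := out = oneVsAll_alt confmatrix
instance (confmatrix : List (List Int)) (out : List (List Int)) : Decidable (Spec_oneVsAll confmatrix out) := by unfold Spec_oneVsAll; infer_instance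

-- ===== CLAIM (what is proved, stated in full; the proofs are below) =====
def Claim_equal_oneVsAll : Prop := ∀ (confmatrix : List (List Int)), Dom_oneVsAll confmatrix → Pre_oneVsAll confmatrix → Spec_oneVsAll confmatrix (oneVsAll confmatrix)

-- ===== LEMMAS AND PROOFS =====

theorem sum_map_sub_int {α : Type} (l : List α) (f g : α → Int) :
    (l.map (fun x => f x - g x)).sum = (l.map f).sum - (l.map g).sum := by
  induction l with
  | nil => simp
  | cons x xs ih => simp [ih]; ring

theorem foldl_add_int {α : Type} (l : List α) (f : α → Int) (a : Int) :
    l.foldl (fun acc x => acc + f x) a = a + (l.map f).sum := by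
  induction l generalizing a with
  | nil => simp
  | cons x xs ih => simp [ih]; ring

-- characterisation of A's 4-tuple loop
theorem foldA (m : List (List Int)) (l : List Int) (a b c d : Int) :
    l.foldl
      (fun (st : Int × Int × Int × Int) i =>
        let rs := rowSumA i m
        let cs := colSumA i m
        (st.1 + pvEnt (pvRow m i) i,
         st.2.1 + rs - pvEnt (pvRow m i) i,
         st.2.2.1 + cs - pvEnt (pvRow m i) i,
         st.2.2.2 + sumAllA m - rs - cs + pvEnt (pvRow m i) i))
      (a, b, c, d)
    = (a + (l.map (fun i => pvEnt (pvRow m i) i)).sum,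
       b + (l.map (fun i => rowSumA i m - pvEnt (pvRow m i) i)).sum,
       c + (l.map (fun i => colSumA i m - pvEnt (pvRow m i) i)).sum,
       d + (l.map (fun i => sumAllA m - rowSumA i m - colSumA i m + pvEnt (pvRow m i) i)).sum) := by
  induction l generalizing a b c d with
  | nil => simp
  | cons x xs ih => simp [List.foldl, ih]; refine ⟨by ring, by ring, by ring, by ring⟩

theorem sum_split {α : Type} (l : List α) (S : Int) (r c d : α → Int) :
    (l.map (fun k => S - r k - c k + d k)).sum
      = (l.length : Int) * S - (l.map r).sum - (l.map c).sum + (l.map d).sum := by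
  induction l with
  | nil => simp
  | cons x xs ih => simp [ih]; ring

-- A's colSum loop written as a sum (foldl_add_int applied to colSumA)
theorem colSumA_eq (m : List (List Int)) (k : Int) :
    colSumA k m
      = ((PySem.List.pyRange 0 ((pvRow m 0).length : Int) 1).map
          (fun i => pvEnt (pvRow m i) k)).sum := by
  unfold colSumA
  rw [foldl_add_int]
  simp

-- A's sumAll loop written as a sum
theorem sumAllA_eq (m : List (List Int)) :
    sumAllA m
      = ((PySem.List.pyRange 0 ((pvRow m 0).length : Int) 1).map
          (fun i => (pvRow m i).sum)).sum := by
  unfold sumAllA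
  rw [foldl_add_int]
  simp

-- the two ports are equal as total functions (pyGetD totalises both in the same way)
theorem ports_eq (m : List (List Int)) : oneVsAll m = oneVsAll_alt m := by
  simp only [oneVsAll, oneVsAll_alt, foldA]
  have hrs : (PySem.List.pyRange 0 ((pvRow m 0).length : Int) 1).map (fun i => rowSumA i m)
      = (PySem.List.pyRange 0 ((pvRow m 0).length : Int) 1).map (fun i => (pvRow m i).sum) := rfl
  simp only [sum_map_sub_int, sum_split, sumAllA_eq, hrs]
  have hcs : (PySem.List.pyRange 0 ((pvRow m 0).length : Int) 1).map (fun i => colSumA i m)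
      = (PySem.List.pyRange 0 ((pvRow m 0).length : Int) 1).map
          (fun j => ((PySem.List.pyRange 0 ((pvRow m 0).length : Int) 1).map
            (fun i => pvEnt (pvRow m i) j)).sum) :=
    List.map_congr_left (fun k _ => colSumA_eq m k)
  rw [hcs]
  have hlen : ((PySem.List.pyRange 0 ((pvRow m 0).length : Int) 1).length : Int)
      = ((pvRow m 0).length : Int) := by
    rw [PySem.List.pyRange_one]
    simp
  simp only [List.cons.injEq, and_true, hlen]
  refine ⟨⟨by ring, by ring⟩, by ring, by ring⟩

-- ===== VERDICT (by name: the statement is the Claim_ definition above) =====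
theorem oneVsAll_spec : Claim_equal_oneVsAll := by
  intro m _ _
  unfold Spec_oneVsAll
  exact ports_eq m
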